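-- pv_equiv track=rewrite | github.com/OnlineFenix/newvip | django_project/views.py | chartMakerOmega
-- ===== SOURCE A (Python) =====
-- def chartMakerOmega(list1, list2, list3, list4, list5, list6):
--     dates = ['01', '02', '03', '04', '05', '06', '07', '08', '09', '10', '11', '12', '13', '14', '15', '16', '17', '18', '19', '20', '21', '22', '23', '24', '25', '26', '27', '28', '29', '30', '31']
--
--     new_list = ['RECORD CHART', 'OCTOBER 2024', '\n', "________________________", 'Date-DB SG FB GB GL DS']
--     tempList = []
--     for i in range(len(list1)):
--         tempList.append(f'{dates[i]}OCT')
--         tempList.append(list1[i])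
--         if i >= len(list2):
--             tempList.append('xx')
--         else:
--             tempList.append(list2[i])
--         if i >= len(list3):
--             tempList.append('xx')
--         else:
--             tempList.append(list3[i])
--         if i >= len(list4):
--             tempList.append('xx')
--         else:
--             tempList.append(list4[i])
--         if i >= len(list5):
--             tempList.append('xx')
--         else:
--             tempList.append(list5[i])
--         if i >= len(list6):
--             tempList.append('xx')
--         else:
--             tempList.append(list6[i])
--         string = '-'.join(tempList)
--         new_list.append(string)
--         tempList = []
--     new_list.append("________________________")
--     new_list.append("https://vip-satta-result.in/")
--     new_list.append("https://vip-satta-result.in/")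
--     return new_list
-- ===== SOURCE B (Python) =====
-- def chartMakerOmega(list1, list2, list3, list4, list5, list6):
--     dates = ['01', '02', '03', '04', '05', '06', '07', '08', '09', '10', '11', '12', '13', '14', '15', '16', '17', '18', '19', '20', '21', '22', '23', '24', '25', '26', '27', '28', '29', '30', '31']
--     # Column-wise construction: start each row as 'ddOCT-<list1 value>', then grow every
--     # row string by one '-<cell>' per remaining column, padding short columns with 'xx'.
--     rows = [d + 'OCT-' + v for d, v in zip(dates, list1)]
--     for col in (list2, list3, list4, list5, list6):
--         rows = [r + '-' + (col[i] if i < len(col) else 'xx') for i, r in enumerate(rows)]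
--     return (['RECORD CHART', 'OCTOBER 2024', '\n', "________________________", 'Date-DB SG FB GB GL DS']
--             + rows
--             + ["________________________", "https://vip-satta-result.in/", "https://vip-satta-result.in/"])
-- ===== Notes on version B (the rewrite author's own statement) =====
-- stated objective: alternative
-- what changed: A builds each row in one row-major pass, collecting seven fields in a temp list and joining them; B builds the table column-wise: it seeds every row string as 'ddOCT-<list1[i]>' and then makes five passes, each extending every accumulated row string by one '-<cell>' (padding 'xx') for the next column, with fixed header/footer concatenated around.
import Mathlib
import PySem

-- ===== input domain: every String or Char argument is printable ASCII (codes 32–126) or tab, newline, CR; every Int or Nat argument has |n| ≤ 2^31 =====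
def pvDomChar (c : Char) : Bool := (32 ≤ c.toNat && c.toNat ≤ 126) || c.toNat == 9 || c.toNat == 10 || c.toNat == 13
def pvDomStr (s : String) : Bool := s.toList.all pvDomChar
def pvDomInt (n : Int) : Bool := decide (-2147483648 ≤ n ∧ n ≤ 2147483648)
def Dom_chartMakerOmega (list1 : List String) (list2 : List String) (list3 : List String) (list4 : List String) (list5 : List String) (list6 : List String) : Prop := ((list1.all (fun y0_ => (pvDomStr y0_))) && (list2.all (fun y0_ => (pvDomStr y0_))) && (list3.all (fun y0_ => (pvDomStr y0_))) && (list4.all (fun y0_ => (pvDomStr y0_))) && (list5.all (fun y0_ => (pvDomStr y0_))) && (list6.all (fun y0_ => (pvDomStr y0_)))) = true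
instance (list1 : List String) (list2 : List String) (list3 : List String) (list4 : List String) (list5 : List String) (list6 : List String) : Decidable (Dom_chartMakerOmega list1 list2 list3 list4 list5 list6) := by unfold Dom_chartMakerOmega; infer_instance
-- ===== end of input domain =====

-- B builds the table column-wise (row strings grown by one '-<cell>' per column over five
-- passes) instead of A's row-major pass joining a seven-field temp list; same cost.

def pvDates : List String := ["01", "02", "03", "04", "05", "06", "07", "08", "09", "10", "11", "12", "13", "14", "15", "16", "17", "18", "19", "20", "21", "22", "23", "24", "25", "26", "27", "28", "29", "30", "31"]

def pvHeader : List String := ["RECORD CHART", "OCTOBER 2024", "\n", "________________________", "Date-DB SG FB GB GL DS"]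

def pvFooter : List String := ["________________________", "https://vip-satta-result.in/", "https://vip-satta-result.in/"]

-- ===== PORT A =====
-- dates[i] is pyGetD; Pre_ (list1.length ≤ 31) excludes exactly the IndexError.
def chartMakerOmega (list1 : List String) (list2 : List String) (list3 : List String) (list4 : List String) (list5 : List String) (list6 : List String) : List String :=
  let new_list :=
    (List.range list1.length).foldl (fun acc (i : Nat) =>
      let tempList : List String :=
        [PySem.List.pyGetD pvDates (i : Int) "" ++ "OCT",
         PySem.List.pyGetD list1 (i : Int) "",
         if list2.length ≤ i then "xx" else PySem.List.pyGetD list2 (i : Int) "",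
         if list3.length ≤ i then "xx" else PySem.List.pyGetD list3 (i : Int) "",
         if list4.length ≤ i then "xx" else PySem.List.pyGetD list4 (i : Int) "",
         if list5.length ≤ i then "xx" else PySem.List.pyGetD list5 (i : Int) "",
         if list6.length ≤ i then "xx" else PySem.List.pyGetD list6 (i : Int) ""]
      acc ++ [PySem.Str.join "-" tempList]) pvHeader
  new_list ++ pvFooter

-- ===== PORT B =====
-- one pass of B's for-loop body: extend every accumulated row string by one '-<cell>'
def pvAddCol (col : List String) (rows : List String) : List String :=
  (PySem.List.enumerate rows 0).map (fun p =>
    p.2 ++ "-" ++ (if p.1 < (col.length : Int) then PySem.List.pyGetD col p.1 "" else "xx"))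

def chartMakerOmega_alt (list1 : List String) (list2 : List String) (list3 : List String) (list4 : List String) (list5 : List String) (list6 : List String) : List String :=
  let rows0 := (pvDates.zip list1).map (fun p => p.1 ++ "OCT-" ++ p.2)
  let rows := [list2, list3, list4, list5, list6].foldl (fun rows col => pvAddCol col rows) rows0
  pvHeader ++ rows ++ pvFooter

-- ===== PRECONDITION & SPEC =====
-- Pre_ excludes exactly len(list1) > 31, where A raises IndexError on dates[i].
def Pre_chartMakerOmega (list1 : List String) (list2 : List String) (list3 : List String) (list4 : List String) (list5 : List String) (list6 : List String) : Prop := list1.length ≤ 31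
instance (list1 : List String) (list2 : List String) (list3 : List String) (list4 : List String) (list5 : List String) (list6 : List String) : Decidable (Pre_chartMakerOmega list1 list2 list3 list4 list5 list6) := by unfold Pre_chartMakerOmega; infer_instance

def pvWitness_chartMakerOmega : List String × List String × List String × List String × List String × List String := (["1", "2"], ["a"], [], ["b", "c", "d"], [], [])

def Spec_chartMakerOmega (list1 : List String) (list2 : List String) (list3 : List String) (list4 : List String) (list5 : List String) (list6 : List String) (out : List String) : Prop := out = chartMakerOmega_alt list1 list2 list3 list4 list5 list6
instance (list1 : List String) (list2 : List String) (list3 : List String) (list4 : List String) (list5 : List String) (list6 : List String) (out : List String) : Decidable (Spec_chartMakerOmega list1 list2 list3 list4 list5 list6 out) := by unfold Spec_chartMakerOmega; infer_instance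

-- ===== CLAIM (what is proved, stated in full; the proofs are below) =====
def Claim_equal_chartMakerOmega : Prop := ∀ (list1 : List String) (list2 : List String) (list3 : List String) (list4 : List String) (list5 : List String) (list6 : List String), Dom_chartMakerOmega list1 list2 list3 list4 list5 list6 → Pre_chartMakerOmega list1 list2 list3 list4 list5 list6 → Spec_chartMakerOmega list1 list2 list3 list4 list5 list6 (chartMakerOmega list1 list2 list3 list4 list5 list6)

-- ===== LEMMAS AND PROOFS =====

theorem pvWitness_ok : Dom_chartMakerOmega pvWitness_chartMakerOmega.1 pvWitness_chartMakerOmega.2.1 pvWitness_chartMakerOmega.2.2.1 pvWitness_chartMakerOmega.2.2.2.1 pvWitness_chartMakerOmega.2.2.2.2.1 pvWitness_chartMakerOmega.2.2.2.2.2 ∧ Pre_chartMakerOmega pvWitness_chartMakerOmega.1 pvWitness_chartMakerOmega.2.1 pvWitness_chartMakerOmega.2.2.1 pvWitness_chartMakerOmega.2.2.2.1 pvWitness_chartMakerOmega.2.2.2.2.1 pvWitness_chartMakerOmega.2.2.2.2.2 := by decide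

theorem addCol_map (col : List String) (n : Nat) (f : Nat → String) :
    pvAddCol col ((List.range n).map f)
      = (List.range n).map (fun i => f i ++ "-" ++ (if col.length ≤ i then "xx" else col.getD i "")) := by
  apply List.ext_getElem
  · simp [pvAddCol, PySem.List.length_enumerate]
  · intro k h1 h2
    simp only [pvAddCol, List.getElem_map, PySem.List.getElem_enumerate, List.getElem_range,
      zero_add]
    congr 1
    by_cases h : k < col.length
    · rw [if_pos (by exact_mod_cast h), if_neg (by omega)]
      simp [PySem.List.pyGetD_natCast]
    · rw [if_neg (by exact_mod_cast h), if_pos (by omega)]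

theorem zip_rows (list1 : List String) (h : list1.length ≤ 31) :
    (pvDates.zip list1).map (fun p => p.1 ++ "OCT-" ++ p.2)
      = (List.range list1.length).map (fun i => pvDates.getD i "" ++ "OCT-" ++ list1.getD i "") := by
  apply List.ext_getElem
  · simp [pvDates]; omega
  · intro k h1 h2
    have hk : k < list1.length := by simpa using h2
    have hd : k < pvDates.length := by simp [pvDates]; omega
    simp [List.getElem_zip, List.getD_eq_getElem?_getD, List.getElem?_eq_getElem hk,
      List.getElem?_eq_getElem hd]

theorem row_eq (d v c2 c3 c4 c5 c6 : String) :
    PySem.Str.join "-" [d ++ "OCT", v, c2, c3, c4, c5, c6]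
      = d ++ "OCT-" ++ v ++ "-" ++ c2 ++ "-" ++ c3 ++ "-" ++ c4 ++ "-" ++ c5 ++ "-" ++ c6 := by
  apply String.toList_injective
  simp [PySem.Str.join, PySem.Chars.join, List.intercalate]

theorem foldl_rows (init : List String) (n : Nat) (f : Nat → String) :
    (List.range n).foldl (fun acc i => acc ++ [f i]) init = init ++ (List.range n).map f := by
  exact PySem.List.foldl_append_singleton_eq_map _ _ _

-- ===== VERDICT (by name: the statement is the Claim_ definition above) =====
set_option maxHeartbeats 1000000 in
theorem chartMakerOmega_spec : Claim_equal_chartMakerOmega := by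
  intro list1 list2 list3 list4 list5 list6 _ hpre
  unfold Spec_chartMakerOmega chartMakerOmega chartMakerOmega_alt
  rw [foldl_rows]
  simp only [List.foldl]
  rw [zip_rows list1 hpre, addCol_map, addCol_map, addCol_map, addCol_map, addCol_map]
  congr 1
  congr 1
  apply List.map_congr_left
  intro i hi
  rw [List.mem_range] at hi
  simp only [PySem.List.pyGetD_natCast]
  rw [row_eq]
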